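-- pv_equiv track=rewrite | github.com/TIM-JYU/TIM | timApp/documentprinter.py | add_nonumber
-- ===== SOURCE A (Python) =====
-- def add_nonumber(md: str) -> str:
--     """
--     add's {.unnumbered} after every heading line that starts with #
--         Special cases:
--             - many # lines in same md
--                 - before #-line there must be at least two cr
--                 - split bteween two cr
--             - line statring with # may continue by ordinary line
--                 - the unnumbered must be added before first cr
--             - line starting with # may continue next line and have \ at the end
--                  - undefined
--     :param md: markdown to be converted
--     :return: markdown with headings marked as unnumbered
--     """
--     mds = md.split("\n\n")
--     result = ""
--     for m in mds:
--         if m.startswith("#"):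
--             ms = m.split("\n")
--             if not ms[0].endswith("\\"):
--                 ms[0] += "{.unnumbered}"
--             m = "\n".join(ms)
--         result += m + "\n\n"
--
--     return result
-- ===== SOURCE B (Python) =====
-- def add_nonumber(md: str) -> str:
--     """Mark markdown headings as unnumbered in a single character scan.
--
--     Walks the text once, tracking whether we are at the start of a block
--     (start of text or right after a blank-line separator).  A block whose
--     first character is '#' gets '{.unnumbered}' appended to its first line,
--     unless that line ends with a backslash.
--     """
--     out = []
--     i = 0
--     n = len(md)
--     block_start = True
--     while i < n:
--         c = md[i]
--         if block_start and c == '#':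
--             j = i
--             while j < n and md[j] != '\n':
--                 j += 1
--             line = md[i:j]
--             if not line.endswith('\\'):
--                 line += '{.unnumbered}'
--             out.append(line)
--             i = j
--             block_start = False
--         elif c == '\n' and i + 1 < n and md[i + 1] == '\n':
--             out.append('\n\n')
--             i += 2
--             block_start = True
--         else:
--             out.append(c)
--             i += 1
--             block_start = False
--     return ''.join(out) + '\n\n'
-- ===== Notes on version B (the rewrite author's own statement) =====
-- stated objective: alternative
-- what changed: Replaced split-into-blocks / per-block rewrite / rejoin-with-separator with a single left-to-right character scan that tracks block boundaries and inserts the marker in place.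
import Mathlib
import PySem

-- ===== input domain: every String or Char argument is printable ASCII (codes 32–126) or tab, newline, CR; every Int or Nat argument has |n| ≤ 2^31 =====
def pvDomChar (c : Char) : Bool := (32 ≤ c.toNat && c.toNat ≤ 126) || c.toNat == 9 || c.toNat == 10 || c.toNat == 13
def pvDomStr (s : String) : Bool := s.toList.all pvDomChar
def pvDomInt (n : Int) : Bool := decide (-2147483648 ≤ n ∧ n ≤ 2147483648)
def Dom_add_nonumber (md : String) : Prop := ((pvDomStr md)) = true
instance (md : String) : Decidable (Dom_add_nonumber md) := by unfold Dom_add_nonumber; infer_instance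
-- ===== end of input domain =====

-- B replaces A's split-into-blocks / rewrite / rejoin with a single character scan; same return value on every input.

def pvMark : List Char := ['{', '.', 'u', 'n', 'n', 'u', 'm', 'b', 'e', 'r', 'e', 'd', '}']

-- ===== PORT A =====
-- per-block body of A's loop: heading blocks get the mark appended to their first line
def aBlock (m : List Char) : List Char :=
  if PySem.Chars.startswith m ['#'] then
    PySem.Chars.join ['\n']
      (if !PySem.Chars.endswith (PySem.List.pyGetD (PySem.Chars.splitOn m ['\n']) 0 []) ['\\'] then
        PySem.List.pySetD (PySem.Chars.splitOn m ['\n']) 0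
          (PySem.List.pyGetD (PySem.Chars.splitOn m ['\n']) 0 [] ++ pvMark)
      else PySem.Chars.splitOn m ['\n'])
  else m

def add_nonumber (md : String) : String :=
  String.ofList ((PySem.Chars.splitOn md.toList ['\n', '\n']).foldl
    (fun result m => result ++ aBlock m ++ ['\n', '\n']) [])

-- ===== PORT B =====
-- single scan with a block-start flag, as in Source B's while loop
def bGo : List Char → Bool → List Char
  | [], _ => []
  | c :: rest, bs =>
    if bs && c == '#' then
      (if PySem.Chars.endswith (c :: rest.takeWhile (· != '\n')) ['\\'] then
          c :: rest.takeWhile (· != '\n')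
        else (c :: rest.takeWhile (· != '\n')) ++ pvMark)
        ++ bGo (rest.dropWhile (· != '\n')) false
    else if c == '\n' && rest.head? == some '\n' then
      '\n' :: '\n' :: bGo rest.tail true
    else
      c :: bGo rest false
termination_by l _ => l.length
decreasing_by
  · exact Nat.lt_succ_of_le (rest.length_dropWhile_le _)
  · exact Nat.lt_succ_of_le (by simp [List.length_tail])
  · exact Nat.lt_succ_self _

def add_nonumber_alt (md : String) : String :=
  String.ofList (bGo md.toList true ++ ['\n', '\n'])

-- ===== PRECONDITION & SPEC =====
def Spec_add_nonumber (md : String) (out : String) : Prop := out = add_nonumber_alt md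
instance (md : String) (out : String) : Decidable (Spec_add_nonumber md out) := by unfold Spec_add_nonumber; infer_instance

-- ===== CLAIM (what is proved, stated in full; the proofs are below) =====
def Claim_equal_add_nonumber : Prop := ∀ (md : String), Dom_add_nonumber md → Spec_add_nonumber md (add_nonumber md)

-- ===== LEMMAS AND PROOFS =====

-- abbreviation for the block separator used throughout the proofs
def pvNN : List Char := ['\n', '\n']

-- ---- generic facts about PySem.Chars.splitOn.go ----

theorem pv_go_nil (sep : List Char) (fuel : Nat) (cur : List Char) (acc : List (List Char)) :
    PySem.Chars.splitOn.go sep fuel [] cur acc = (cur.reverse :: acc).reverse := by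
  cases fuel <;> simp [PySem.Chars.splitOn.go]

theorem pv_go_cons (sep : List Char) (f : Nat) (c : Char) (rest cur : List Char)
    (acc : List (List Char)) :
    PySem.Chars.splitOn.go sep (f + 1) (c :: rest) cur acc
      = if sep.isPrefixOf (c :: rest) then
          PySem.Chars.splitOn.go sep f (List.drop sep.length (c :: rest)) [] (cur.reverse :: acc)
        else PySem.Chars.splitOn.go sep f rest (c :: cur) acc := by
  rfl

theorem pv_go_acc (sep : List Char) (fuel : Nat) (l cur : List Char) (acc : List (List Char)) :
    PySem.Chars.splitOn.go sep fuel l cur acc = acc.reverse ++ PySem.Chars.splitOn.go sep fuel l cur [] := by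
  induction fuel generalizing l cur acc with
  | zero => simp [PySem.Chars.splitOn.go]
  | succ f ih =>
    cases l with
    | nil => simp [PySem.Chars.splitOn.go]
    | cons c rest =>
      by_cases h : sep.isPrefixOf (c :: rest)
      · rw [show PySem.Chars.splitOn.go sep (f+1) (c :: rest) cur acc
              = PySem.Chars.splitOn.go sep f (List.drop sep.length (c :: rest)) [] (cur.reverse :: acc) by
            simp [PySem.Chars.splitOn.go, h],
          show PySem.Chars.splitOn.go sep (f+1) (c :: rest) cur []
              = PySem.Chars.splitOn.go sep f (List.drop sep.length (c :: rest)) [] [cur.reverse] by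
            simp [PySem.Chars.splitOn.go, h]]
        rw [ih _ _ (cur.reverse :: acc), ih _ _ [cur.reverse]]
        simp
      · rw [show PySem.Chars.splitOn.go sep (f+1) (c :: rest) cur acc
              = PySem.Chars.splitOn.go sep f rest (c :: cur) acc by
            simp [PySem.Chars.splitOn.go, h],
          show PySem.Chars.splitOn.go sep (f+1) (c :: rest) cur []
              = PySem.Chars.splitOn.go sep f rest (c :: cur) [] by
            simp [PySem.Chars.splitOn.go, h]]
        exact ih _ _ acc

theorem pv_go_fuel (sep : List Char) (hsep : sep ≠ []) :
    ∀ (n fuel fuel' : Nat) (l cur : List Char) (acc : List (List Char)),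
      l.length = n → n < fuel → n < fuel' →
      PySem.Chars.splitOn.go sep fuel l cur acc = PySem.Chars.splitOn.go sep fuel' l cur acc := by
  intro n
  induction n using Nat.strong_induction_on with
  | _ n ih =>
    intro fuel fuel' l cur acc hn hf hf'
    cases l with
    | nil => rw [pv_go_nil, pv_go_nil]
    | cons c rest =>
      simp only [List.length_cons] at hn
      obtain ⟨f, rfl⟩ : ∃ f, fuel = f + 1 := ⟨fuel - 1, by omega⟩
      obtain ⟨f', rfl⟩ : ∃ f', fuel' = f' + 1 := ⟨fuel' - 1, by omega⟩
      have hslen : 1 ≤ sep.length := List.length_pos_of_ne_nil hsep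
      by_cases h : sep.isPrefixOf (c :: rest)
      · rw [show PySem.Chars.splitOn.go sep (f+1) (c :: rest) cur acc
              = PySem.Chars.splitOn.go sep f (List.drop sep.length (c :: rest)) [] (cur.reverse :: acc) by
            simp [PySem.Chars.splitOn.go, h],
          show PySem.Chars.splitOn.go sep (f'+1) (c :: rest) cur acc
              = PySem.Chars.splitOn.go sep f' (List.drop sep.length (c :: rest)) [] (cur.reverse :: acc) by
            simp [PySem.Chars.splitOn.go, h]]
        exact ih (List.drop sep.length (c :: rest)).length
          (by simp only [List.length_drop, List.length_cons]; omega) _ _ _ _ _ rfl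
          (by simp only [List.length_drop, List.length_cons]; omega)
          (by simp only [List.length_drop, List.length_cons]; omega)
      · rw [show PySem.Chars.splitOn.go sep (f+1) (c :: rest) cur acc
              = PySem.Chars.splitOn.go sep f rest (c :: cur) acc by
            simp [PySem.Chars.splitOn.go, h],
          show PySem.Chars.splitOn.go sep (f'+1) (c :: rest) cur acc
              = PySem.Chars.splitOn.go sep f' rest (c :: cur) acc by
            simp [PySem.Chars.splitOn.go, h]]
        exact ih rest.length (by omega) _ _ _ _ _ rfl (by omega) (by omega)

theorem pv_go_copy (sep : List Char) :
    ∀ (b t cur : List Char) (acc : List (List Char)) (fuel : Nat),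
      b.length < fuel →
      (∀ i, i < b.length → ¬ sep.isPrefixOf (b.drop i ++ t)) →
      PySem.Chars.splitOn.go sep fuel (b ++ t) cur acc
        = PySem.Chars.splitOn.go sep (fuel - b.length) t (b.reverse ++ cur) acc := by
  intro b
  induction b with
  | nil => intro t cur acc fuel _ _; simp
  | cons c b' ih =>
    intro t cur acc fuel hf hpre
    obtain ⟨f, rfl⟩ : ∃ f, fuel = f + 1 := ⟨fuel - 1, by omega⟩
    have h0 : ¬ sep.isPrefixOf ((c :: b') ++ t) := by
      have := hpre 0 (by simp)
      simpa using this
    rw [List.cons_append, pv_go_cons, if_neg (by rw [← List.cons_append]; exact h0)]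
    rw [ih t (c :: cur) acc f (by simp at hf; omega)
      (fun i hi => by simpa using hpre (i+1) (by simp only [List.length_cons]; omega))]
    have h1 : f + 1 - (c :: b').length = f - b'.length := by simp only [List.length_cons]; omega
    have h2 : (c :: b').reverse ++ cur = b'.reverse ++ c :: cur := by simp
    rw [h1, h2]

theorem pv_go_sep_step (sep : List Char) (hsep : sep ≠ []) (l cur : List Char)
    (acc : List (List Char)) (f : Nat) (h : sep.isPrefixOf l) :
    PySem.Chars.splitOn.go sep (f + 1) l cur acc
      = PySem.Chars.splitOn.go sep f (List.drop sep.length l) [] (cur.reverse :: acc) := by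
  cases l with
  | nil =>
    exfalso
    cases sep with
    | nil => exact hsep rfl
    | cons a s => simp [List.isPrefixOf] at h
  | cons c rest => simp [PySem.Chars.splitOn.go, h]

-- splitOn of an input with no separator occurrence
theorem pv_splitOn_single (sep cs : List Char) (_hsep : sep ≠ [])
    (h : ∀ i, i < cs.length → ¬ sep.isPrefixOf (cs.drop i)) :
    PySem.Chars.splitOn cs sep = [cs] := by
  unfold PySem.Chars.splitOn
  have hcopy := pv_go_copy sep cs [] [] [] (cs.length + 1) (by omega)
    (fun i hi => by simpa using h i hi)
  simp only [List.append_nil] at hcopy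
  rw [hcopy, pv_go_nil]
  simp

-- splitOn when the FIRST separator occurrence is right after b
theorem pv_splitOn_cons (sep b rest : List Char) (hsep : sep ≠ [])
    (h : ∀ i, i < b.length → ¬ sep.isPrefixOf ((b ++ sep ++ rest).drop i)) :
    PySem.Chars.splitOn (b ++ sep ++ rest) sep = b :: PySem.Chars.splitOn rest sep := by
  unfold PySem.Chars.splitOn
  have hslen : 1 ≤ sep.length := List.length_pos_of_ne_nil hsep
  rw [List.append_assoc]
  have hcopy := pv_go_copy sep b (sep ++ rest) [] [] ((b ++ (sep ++ rest)).length + 1)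
    (by simp only [List.length_append]; omega)
    (fun i hi => by
      have := h i hi
      rw [List.append_assoc] at this
      rwa [List.drop_append_of_le_length (le_of_lt hi)] at this)
  rw [hcopy]
  obtain ⟨g, hg⟩ : ∃ g, (b ++ (sep ++ rest)).length + 1 - b.length = g + 1 :=
    ⟨sep.length + rest.length, by simp only [List.length_append]; omega⟩
  rw [hg, pv_go_sep_step sep hsep _ _ _ _ (by rw [List.isPrefixOf_iff_prefix]; exact List.prefix_append sep rest)]
  rw [show List.drop sep.length (sep ++ rest) = rest from by simp]
  rw [pv_go_acc]
  rw [pv_go_fuel sep hsep rest.length g (rest.length + 1) rest [] [] rfl (by simp at hg; omega) (by omega)]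
  simp

-- ---- facts about the '\n'-split used inside a block ----

theorem pv_tw_append (xs ys : List Char) :
    (xs ++ '\n' :: ys).takeWhile (· != '\n') = xs.takeWhile (· != '\n') := by
  induction xs with
  | nil => simp
  | cons c xs ih =>
    by_cases h : c = '\n'
    · subst h; simp
    · have hc : (c != '\n') = true := by simp [h]
      simp [hc, ih]

theorem pv_dw_append (xs ys : List Char) :
    (xs ++ '\n' :: ys).dropWhile (· != '\n') = xs.dropWhile (· != '\n') ++ '\n' :: ys := by
  induction xs with
  | nil => simp
  | cons c xs ih =>
    by_cases h : c = '\n'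
    · subst h; simp
    · have hc : (c != '\n') = true := by simp [h]
      simp [hc, ih]

theorem pv_isPrefixOf_nl_head (l : List Char) (h : (['\n'] : List Char).isPrefixOf l) :
    l.head? = some '\n' := by
  cases l with
  | nil => simp [List.isPrefixOf] at h
  | cons a t =>
    simp [List.isPrefixOf] at h
    cases h
    rfl

theorem pv_dropWhile_head (cs d : List Char) (c : Char)
    (hd : cs.dropWhile (· != '\n') = c :: d) : c = '\n' := by
  have := List.head?_dropWhile_not (· != '\n') cs
  rw [hd] at this
  simpa using this

theorem pv_splitOn_nl (cs : List Char) :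
    PySem.Chars.splitOn cs ['\n']
      = cs.takeWhile (· != '\n') ::
        (match cs.dropWhile (· != '\n') with
         | [] => []
         | _ :: d => PySem.Chars.splitOn d ['\n']) := by
  have hdec := List.takeWhile_append_dropWhile (p := (· != '\n')) (l := cs)
  cases hd : cs.dropWhile (· != '\n') with
  | nil =>
    have hcs : cs.takeWhile (· != '\n') = cs := by
      conv_rhs => rw [← hdec, hd, List.append_nil]
    rw [pv_splitOn_single ['\n'] cs (by simp)]
    · rw [hcs]
    · intro i hi hpre
      rw [List.isPrefixOf_iff_prefix] at hpre
      have hmem : '\n' ∈ cs.drop i := hpre.mem (by simp)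
      have hmem2 : '\n' ∈ cs := List.mem_of_mem_drop hmem
      rw [← hcs] at hmem2
      have := List.mem_takeWhile_imp hmem2
      simp at this
  | cons c d =>
    obtain rfl := pv_dropWhile_head cs d c hd
    have hcs : cs = cs.takeWhile (· != '\n') ++ ['\n'] ++ d := by
      conv_lhs => rw [← hdec, hd]
      simp
    have hside : ∀ i, i < (cs.takeWhile (· != '\n')).length →
        ¬ (['\n'] : List Char).isPrefixOf ((cs.takeWhile (· != '\n') ++ ['\n'] ++ d).drop i) := by
      intro i hi hpre
      have hh := pv_isPrefixOf_nl_head _ hpre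
      rw [List.head?_drop, List.append_assoc, List.getElem?_append_left hi] at hh
      have hmem : ('\n' : Char) ∈ cs.takeWhile (· != '\n') := List.mem_of_getElem? hh
      have := List.mem_takeWhile_imp hmem
      simp at this
    calc PySem.Chars.splitOn cs ['\n']
        = PySem.Chars.splitOn (cs.takeWhile (· != '\n') ++ ['\n'] ++ d) ['\n'] := by rw [← hcs]
      _ = cs.takeWhile (· != '\n') :: PySem.Chars.splitOn d ['\n'] :=
          pv_splitOn_cons ['\n'] _ d (by simp) hside

theorem pv_pySetD_zero (a : List Char) (l : List (List Char)) (x : List Char) :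
    PySem.List.pySetD (a :: l) (0 : Int) x = x :: l := by
  simp [pysem]

theorem pv_splitOn_nl_ne_nil (cs : List Char) : PySem.Chars.splitOn cs ['\n'] ≠ [] := by
  rw [pv_splitOn_nl]
  simp

theorem pv_join_cons (x : List Char) (ps : List (List Char)) (hps : ps ≠ []) :
    PySem.Chars.join ['\n'] (x :: ps) = x ++ '\n' :: PySem.Chars.join ['\n'] ps := by
  cases ps with
  | nil => exact absurd rfl hps
  | cons y t =>
    rw [PySem.Chars.join_cons_cons]
    simp

theorem pv_join_inv (cs : List Char) :
    PySem.Chars.join ['\n'] (PySem.Chars.splitOn cs ['\n']) = cs := by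
  induction hn : cs.length using Nat.strong_induction_on generalizing cs with
  | _ n ih =>
    rw [pv_splitOn_nl]
    have hdec := List.takeWhile_append_dropWhile (p := (· != '\n')) (l := cs)
    cases hd : cs.dropWhile (· != '\n') with
    | nil =>
      have hcs : cs.takeWhile (· != '\n') = cs := by
        conv_rhs => rw [← hdec, hd, List.append_nil]
      rw [PySem.Chars.join_singleton, hcs]
    | cons c d =>
      obtain rfl := pv_dropWhile_head cs d c hd
      have hlen : d.length < n := by
        have h1 : (cs.dropWhile (· != '\n')).length ≤ cs.length := List.length_dropWhile_le _ _
        rw [hd] at h1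
        simp at h1
        omega
      rw [pv_join_cons _ _ (pv_splitOn_nl_ne_nil d), ih d.length hlen d rfl]
      conv_rhs => rw [← hdec, hd]

-- join after replacing the first piece
theorem pv_join_set_head (cs x : List Char) :
    PySem.Chars.join ['\n']
        (PySem.List.pySetD (PySem.Chars.splitOn cs ['\n']) 0 x)
      = x ++ cs.dropWhile (· != '\n') := by
  rw [pv_splitOn_nl]
  cases hd : cs.dropWhile (· != '\n') with
  | nil =>
    rw [pv_pySetD_zero, PySem.Chars.join_singleton]
    simp
  | cons c d =>
    obtain rfl := pv_dropWhile_head cs d c hd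
    rw [pv_pySetD_zero, pv_join_cons _ _ (pv_splitOn_nl_ne_nil d), pv_join_inv]

theorem pv_first_piece (cs : List Char) :
    PySem.List.pyGetD (PySem.Chars.splitOn cs ['\n']) 0 [] = cs.takeWhile (· != '\n') := by
  rw [pv_splitOn_nl]
  exact PySem.List.pyGetD_zero_cons ..

-- aBlock on a heading block, in takeWhile/dropWhile form
theorem pv_aBlock_hash (r : List Char) :
    aBlock ('#' :: r)
      = (if PySem.Chars.endswith ('#' :: r.takeWhile (· != '\n')) ['\\'] then
            '#' :: r.takeWhile (· != '\n')
          else ('#' :: r.takeWhile (· != '\n')) ++ pvMark)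
        ++ r.dropWhile (· != '\n') := by
  have hsw : PySem.Chars.startswith ('#' :: r) ['#'] = true := by
    simp [PySem.Chars.startswith, List.isPrefixOf]
  have htw : ('#' :: r).takeWhile (· != '\n') = '#' :: r.takeWhile (· != '\n') := by
    simp
  have hdw : ('#' :: r).dropWhile (· != '\n') = r.dropWhile (· != '\n') := by
    simp
  unfold aBlock
  rw [if_pos hsw, pv_first_piece, htw]
  by_cases he : PySem.Chars.endswith ('#' :: r.takeWhile (· != '\n')) ['\\'] = true
  · rw [if_neg (by rw [he]; simp), if_pos he, pv_join_inv]
    have hr := List.takeWhile_append_dropWhile (p := (· != '\n')) (l := r)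
    rw [List.cons_append, hr]
  · rw [if_pos (by rw [Bool.not_eq_true] at he; rw [he]; simp), if_neg he,
      pv_join_set_head, hdw]

theorem pv_aBlock_not_hash (b : List Char) (h : b.head? ≠ some '#') : aBlock b = b := by
  unfold aBlock
  rw [if_neg]
  simp only [PySem.Chars.startswith, List.isPrefixOf_iff_prefix]
  intro hpre
  cases b with
  | nil => simp at hpre
  | cons c r =>
    simp at hpre h
    exact h hpre.symm

-- ---- infix helpers for the separator ['\n','\n'] ----

theorem pv_nn_prefix_cons (c : Char) (r : List Char) :
    pvNN <+: (c :: r) ↔ c = '\n' ∧ r.head? = some '\n' := by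
  unfold pvNN
  constructor
  · rintro ⟨t, ht⟩
    injection ht with h1 h2
    subst h1
    exact ⟨rfl, by rw [← h2]; rfl⟩
  · rintro ⟨rfl, hh⟩
    cases r with
    | nil => simp at hh
    | cons d r' =>
      simp at hh
      subst hh
      exact ⟨r', rfl⟩

theorem pv_not_infix_tail (c : Char) (r : List Char) (h : ¬ pvNN <:+: (c :: r)) : ¬ pvNN <:+: r :=
  fun hr => h (hr.trans (List.suffix_cons c r).isInfix)

theorem pv_not_infix_of_suffix (s l : List Char) (hs : s <:+ l) (h : ¬ pvNN <:+: l) : ¬ pvNN <:+: s :=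
  fun hr => h (hr.trans hs.isInfix)

-- ---- B's scan, block by block ----

theorem pv_bGo_cons (c : Char) (rest : List Char) (bs : Bool) :
    bGo (c :: rest) bs
      = if bs && c == '#' then
          (if PySem.Chars.endswith (c :: rest.takeWhile (· != '\n')) ['\\'] then
              c :: rest.takeWhile (· != '\n')
            else (c :: rest.takeWhile (· != '\n')) ++ pvMark)
            ++ bGo (rest.dropWhile (· != '\n')) false
        else if c == '\n' && rest.head? == some '\n' then
          '\n' :: '\n' :: bGo rest.tail true
        else
          c :: bGo rest false := by
  simp only [bGo]

theorem pv_bGo_false_end (t : List Char) (h : ¬ pvNN <:+: t) : bGo t false = t := by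
  induction t with
  | nil => simp [bGo]
  | cons c r ih =>
    have hsep : ¬ (c == '\n' && r.head? == some '\n') = true := by
      intro hy
      simp at hy
      exact h (List.infix_cons_iff.mpr (Or.inl ((pv_nn_prefix_cons c r).mpr hy)))
    rw [pv_bGo_cons]
    simp only [Bool.false_and, Bool.false_eq_true, if_false]
    rw [if_neg hsep, ih (pv_not_infix_tail c r h)]

theorem pv_bGo_false_sep (t rest : List Char) (h : ¬ pvNN <:+: (t ++ ['\n'])) :
    bGo (t ++ '\n' :: '\n' :: rest) false = t ++ '\n' :: '\n' :: bGo rest true := by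
  induction t with
  | nil =>
    rw [List.nil_append, pv_bGo_cons]
    simp only [Bool.false_and, Bool.false_eq_true, if_false]
    rw [if_pos (by simp)]
    simp
  | cons c t' ih =>
    have hsep : ¬ (c == '\n' && (t' ++ '\n' :: '\n' :: rest).head? == some '\n') = true := by
      intro hy
      simp only [Bool.and_eq_true, beq_iff_eq] at hy
      obtain ⟨rfl, hh⟩ := hy
      apply h
      cases t' with
      | nil => exact List.infix_cons_iff.mpr (Or.inl (by simp [pvNN]))
      | cons d t'' =>
        simp at hh
        subst hh
        exact List.infix_cons_iff.mpr (Or.inl ((pv_nn_prefix_cons _ _).mpr ⟨rfl, by simp⟩))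
    rw [List.cons_append, pv_bGo_cons]
    simp only [Bool.false_and, Bool.false_eq_true, if_false]
    rw [if_neg hsep, ih (fun hr => h (hr.trans (List.suffix_cons c (t' ++ ['\n'])).isInfix))]
    simp

theorem pv_bGo_true_end (b : List Char) (h : ¬ pvNN <:+: b) : bGo b true = aBlock b := by
  cases b with
  | nil => simp [bGo, aBlock, PySem.Chars.startswith, List.isPrefixOf]
  | cons c r =>
    by_cases hc : c = '#'
    · subst hc
      rw [pv_bGo_cons, if_pos (by decide)]
      rw [pv_bGo_false_end _ (pv_not_infix_of_suffix _ r (List.dropWhile_suffix _)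
        (pv_not_infix_tail '#' r h))]
      rw [pv_aBlock_hash]
    · have hsep : ¬ (c == '\n' && r.head? == some '\n') = true := by
        intro hy
        simp at hy
        exact h (List.infix_cons_iff.mpr (Or.inl ((pv_nn_prefix_cons c r).mpr hy)))
      rw [show bGo (c :: r) true = c :: bGo r false by simp [bGo, hsep, hc]]
      rw [pv_bGo_false_end _ (pv_not_infix_tail c r h)]
      rw [pv_aBlock_not_hash _ (by simp [hc])]

theorem pv_bGo_true_sep (b rest : List Char) (h : ¬ pvNN <:+: (b ++ ['\n'])) :
    bGo (b ++ '\n' :: '\n' :: rest) true = aBlock b ++ '\n' :: '\n' :: bGo rest true := by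
  cases b with
  | nil => simp [bGo, aBlock, PySem.Chars.startswith, List.isPrefixOf]
  | cons c r =>
    by_cases hc : c = '#'
    · subst hc
      rw [show ('#' :: r) ++ '\n' :: '\n' :: rest = '#' :: (r ++ '\n' :: '\n' :: rest) by simp]
      rw [pv_bGo_cons, if_pos (by decide)]
      rw [show (r ++ '\n' :: '\n' :: rest).takeWhile (· != '\n') = r.takeWhile (· != '\n') from
          pv_tw_append r ('\n' :: rest)]
      rw [show (r ++ '\n' :: '\n' :: rest).dropWhile (· != '\n')
            = r.dropWhile (· != '\n') ++ '\n' :: '\n' :: rest from pv_dw_append r ('\n' :: rest)]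
      rw [pv_bGo_false_sep (r.dropWhile (· != '\n')) rest
        (fun hr => h (hr.trans (show (r.dropWhile (· != '\n') ++ ['\n']) <:+ ('#' :: r ++ ['\n']) from by
          obtain ⟨u, hu⟩ := List.dropWhile_suffix (l := r) (p := (· != '\n'))
          exact ⟨'#' :: u, by rw [show ('#' :: u) ++ (r.dropWhile (· != '\n') ++ ['\n'])
            = '#' :: (u ++ r.dropWhile (· != '\n')) ++ ['\n'] by simp, hu]⟩).isInfix))]
      rw [pv_aBlock_hash]
      simp
    · have hsep : ¬ (c == '\n' && (r ++ '\n' :: '\n' :: rest).head? == some '\n') = true := by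
        intro hy
        simp only [Bool.and_eq_true, beq_iff_eq] at hy
        obtain ⟨rfl, hh⟩ := hy
        apply h
        cases r with
        | nil => exact List.infix_cons_iff.mpr (Or.inl (by simp [pvNN]))
        | cons d r' =>
          simp at hh
          subst hh
          exact List.infix_cons_iff.mpr (Or.inl ((pv_nn_prefix_cons _ _).mpr ⟨rfl, by simp⟩))
      rw [show (c :: r) ++ '\n' :: '\n' :: rest = c :: (r ++ '\n' :: '\n' :: rest) by simp]
      rw [pv_bGo_cons, if_neg (by simp [hc]), if_neg hsep]
      rw [pv_bGo_false_sep r rest (fun hr =>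
        h (hr.trans (List.suffix_cons c (r ++ ['\n'])).isInfix))]
      rw [pv_aBlock_not_hash _ (by simp [hc])]
      simp

-- first-occurrence decomposition of a double newline
theorem pv_first_occ (cs : List Char) (h : pvNN <:+: cs) :
    ∃ b rest, cs = b ++ '\n' :: '\n' :: rest ∧ ¬ pvNN <:+: (b ++ ['\n']) := by
  induction cs with
  | nil => exact absurd (List.eq_nil_of_infix_nil h) (by simp [pvNN])
  | cons c r ih =>
    by_cases hp : c = '\n' ∧ r.head? = some '\n'
    · obtain ⟨rfl, hh⟩ := hp
      cases r with
      | nil => simp at hh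
      | cons d r' =>
        simp at hh
        subst hh
        refine ⟨[], r', by simp, ?_⟩
        unfold pvNN
        intro hx
        have := hx.length_le
        simp at this
    · have hr : pvNN <:+: r := by
        rcases List.infix_cons_iff.mp h with h1 | h2
        · exact absurd ((pv_nn_prefix_cons c r).mp h1) hp
        · exact h2
      obtain ⟨b', rest, rfl, hb'⟩ := ih hr
      refine ⟨c :: b', rest, by simp, ?_⟩
      intro hin
      rcases List.infix_cons_iff.mp hin with h1 | h2
      · rcases (pv_nn_prefix_cons c (b' ++ ['\n'])).mp h1 with ⟨rfl, hh⟩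
        cases b' with
        | nil => exact hp ⟨rfl, by simp⟩
        | cons d b'' =>
          simp at hh
          subst hh
          exact hp ⟨rfl, by simp⟩
      · exact hb' h2

-- the first-occurrence condition delivers pv_splitOn_cons's side condition
theorem pv_no_early_prefix (b rest : List Char) (hb : ¬ pvNN <:+: (b ++ ['\n'])) :
    ∀ i, i < b.length → ¬ pvNN.isPrefixOf ((b ++ pvNN ++ rest).drop i) := by
  intro i hi hpre
  rw [List.isPrefixOf_iff_prefix] at hpre
  obtain ⟨t, ht⟩ := hpre
  apply hb
  have hpre2 : pvNN <+: (b ++ ['\n']).drop i := by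
    have hX : (b ++ ['\n']).drop i = ((b ++ pvNN ++ rest).take (b.length + 1)).drop i := by
      rw [show b ++ pvNN ++ rest = (b ++ ['\n']) ++ ('\n' :: rest) by simp [pvNN]]
      rw [List.take_left' (by simp)]
    rw [hX, List.drop_take, ← ht]
    obtain ⟨k, hk⟩ : ∃ k, b.length + 1 - i = pvNN.length + k :=
      ⟨b.length + 1 - i - 2, by simp [pvNN]; omega⟩
    rw [hk, List.take_append]
    refine ⟨t.take k, ?_⟩
    unfold pvNN
    rw [List.take_of_length_le (Nat.le_add_right _ _)]
    simp
  exact hpre2.isInfix.trans (List.drop_suffix i (b ++ ['\n'])).isInfix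

-- ---- the main induction: B's scan equals A's block-by-block rebuild ----

theorem pv_main (cs : List Char) :
    bGo cs true ++ ['\n', '\n']
      = (PySem.Chars.splitOn cs pvNN).flatMap (fun m => aBlock m ++ ['\n', '\n']) := by
  induction hn : cs.length using Nat.strong_induction_on generalizing cs with
  | _ n ih =>
    by_cases h : pvNN <:+: cs
    · obtain ⟨b, rest, rfl, hb⟩ := pv_first_occ cs h
      rw [show b ++ '\n' :: '\n' :: rest = b ++ pvNN ++ rest by simp [pvNN]] at hn ⊢
      rw [pv_splitOn_cons pvNN b rest (by simp [pvNN]) (pv_no_early_prefix b rest hb)]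
      rw [show b ++ pvNN ++ rest = b ++ '\n' :: '\n' :: rest by simp [pvNN]]
      rw [pv_bGo_true_sep b rest hb]
      have hlen : rest.length < n := by
        simp [pvNN] at hn
        omega
      rw [List.flatMap_cons, ← ih rest.length hlen rest rfl]
      simp
    · rw [pv_splitOn_single pvNN cs (by simp [pvNN]) (fun i hi hpre => by
        rw [List.isPrefixOf_iff_prefix] at hpre
        exact h (hpre.isInfix.trans (List.drop_suffix i cs).isInfix))]
      rw [pv_bGo_true_end cs h]
      simp

-- fold of A's loop is a flatMap
theorem pv_foldl_flatMap (bs : List (List Char)) :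
    bs.foldl (fun result m => result ++ aBlock m ++ ['\n', '\n']) []
      = bs.flatMap (fun m => aBlock m ++ ['\n', '\n']) := by
  have hgen : ∀ (init : List Char),
      bs.foldl (fun result m => result ++ aBlock m ++ ['\n', '\n']) init
        = init ++ bs.flatMap (fun m => aBlock m ++ ['\n', '\n']) := by
    induction bs with
    | nil => intro init; simp
    | cons b bs ih =>
      intro init
      simp only [List.foldl_cons, List.flatMap_cons]
      rw [ih]
      simp
  simpa using hgen []

-- ===== VERDICT (by name: the statement is the Claim_ definition above) =====
theorem add_nonumber_spec : Claim_equal_add_nonumber := by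
  intro md _
  unfold Spec_add_nonumber add_nonumber add_nonumber_alt
  rw [pv_foldl_flatMap,
    show PySem.Chars.splitOn md.toList ['\n', '\n'] = PySem.Chars.splitOn md.toList pvNN from rfl,
    ← pv_main md.toList]
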